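-- pv_equiv track=rewrite | github.com/m-hahn/infolocality | pmonad_experiments.py | change_agreement
-- ===== SOURCE A (Python) =====
-- def change_agreement(terminals):
--     # ('Det', 'N_2_pl', 'Prep', 'Det', 'N_2_pl', 'V_5_pl', 'Det', 'N_1_pl', 'Rel', 'Det', 'N_2_sg', 'V_5_sg')
--     # the doctors in the houses hate the monkeys that the criminal hates
--     # modify now so that every V_{v}_{pl} agrees with the *most recent* noun.
--     def gen():
--         plural_state = None
--         for terminal in terminals:
--             if terminal.startswith("N"):
--                 _, _, plural_state = terminal.split("_")
--                 yield terminal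
--             elif terminal.startswith("V"):
--                 V, v, _ = terminal.split("_")
--                 yield "_".join([V, v, plural_state])
--             else:
--                 yield terminal
--     return tuple(gen())
-- ===== SOURCE B (Python) =====
-- def change_agreement(terminals):
--     # For each verb, scan backward from its position to the nearest preceding noun
--     # and take that noun's plurality suffix; nouns and other terminals pass through.
--     def plurality_before(i):
--         for j in range(i - 1, -1, -1):
--             if terminals[j].startswith("N"):
--                 return terminals[j].split("_")[-1]
--         return None
--
--     out = []
--     for i, t in enumerate(terminals):
--         if t.startswith("V"):
--             stem = t.split("_")
--             out.append("_".join([stem[0], stem[1], plurality_before(i)]))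
--         else:
--             out.append(t)
--     return tuple(out)
-- ===== Notes on version B (the rewrite author's own statement) =====
-- stated objective: alternative
-- what changed: Replaces A's single forward pass carrying a plural_state through a generator by an indexed loop that, at each verb, scans backward for the nearest preceding noun and reads its plurality suffix.
import Mathlib
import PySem

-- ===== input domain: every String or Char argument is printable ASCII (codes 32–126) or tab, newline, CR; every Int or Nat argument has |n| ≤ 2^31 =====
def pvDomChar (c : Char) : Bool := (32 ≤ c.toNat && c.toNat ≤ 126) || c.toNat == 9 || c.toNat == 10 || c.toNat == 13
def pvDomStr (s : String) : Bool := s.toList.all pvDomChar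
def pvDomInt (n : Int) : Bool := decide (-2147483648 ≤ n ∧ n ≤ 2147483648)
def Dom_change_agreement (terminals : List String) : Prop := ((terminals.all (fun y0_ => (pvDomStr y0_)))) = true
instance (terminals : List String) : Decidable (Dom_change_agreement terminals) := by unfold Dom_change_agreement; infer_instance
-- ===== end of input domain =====

-- B replaces A's forward state-carrying pass by a per-verb backward scan for the
-- nearest preceding noun (alternative decomposition, not faster).

-- ===== PORT A =====
-- t.split("_"): the separator "_" is nonempty, so split? is always some.
def splitU (t : String) : List String := (PySem.Str.split? t "_").getD []
-- One generator step of A: the accumulator is (yielded-so-far, plural_state).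
-- Where Python A raises (ValueError on a split not unpacking to 3, TypeError on
-- join with plural_state = None) we yield the terminal unchanged; Pre_ excludes
-- exactly those inputs.
def stepA (acc : List String × Option String) (t : String) : List String × Option String :=
  if PySem.Str.startswith t "N" then
    match splitU t with
    | [_, _, p] => (acc.1 ++ [t], some p)
    | _ => (acc.1 ++ [t], acc.2)            -- Python: ValueError (outside Pre_)
  else if PySem.Str.startswith t "V" then
    match splitU t with
    | [V, v, _] =>
      match acc.2 with
      | some p => (acc.1 ++ [PySem.Str.join "_" [V, v, p]], acc.2)
      | none => (acc.1 ++ [t], acc.2)       -- Python: TypeError (outside Pre_)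
    | _ => (acc.1 ++ [t], acc.2)            -- Python: ValueError (outside Pre_)
  else (acc.1 ++ [t], acc.2)

def change_agreement (terminals : List String) : List String :=
  (terminals.foldl stepA ([], none)).1

-- ===== PORT B =====
-- Source B's plurality_before(i): for j in range(i-1, -1, -1): …  (indexing is always
-- in range here, so pyGetD is exact)
def pluralityBefore (terminals : List String) : Nat → Option String
  | 0 => none
  | j + 1 =>
    let t := PySem.List.pyGetD terminals (j : Int) ""
    if PySem.Str.startswith t "N" then PySem.List.pyGet? (splitU t) (-1)
    else pluralityBefore terminals j

-- Source B's main loop over enumerate(terminals); on plurality_before = None Python B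
-- raises TypeError (outside Pre_): we emit t unchanged there.
def altGo (terminals : List String) : Nat → List String → List String
  | _, [] => []
  | i, t :: rest =>
    (if PySem.Str.startswith t "V" then
       match pluralityBefore terminals i with
       | some p =>
         let stem := splitU t
         PySem.Str.join "_" [stem.getD 0 "", stem.getD 1 "", p]
       | none => t                          -- Python: TypeError (outside Pre_)
     else t) :: altGo terminals (i + 1) rest

def change_agreement_alt (terminals : List String) : List String :=
  altGo terminals 0 terminals

-- ===== PRECONDITION & SPEC =====
-- Pre_ admits exactly the inputs on which Python A returns: every terminal
-- starting with "N" or "V" splits on "_" into exactly three parts (else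
-- ValueError), and every verb has some preceding noun (else plural_state is
-- None and "_".join raises TypeError).
def Pre_change_agreement (terminals : List String) : Prop :=
  ∀ i : Fin terminals.length,
    (PySem.Str.startswith terminals[i] "N" = true →
       (splitU terminals[i]).length = 3) ∧
    (PySem.Str.startswith terminals[i] "V" = true →
       (splitU terminals[i]).length = 3 ∧
       ∃ j : Fin terminals.length, (j : Nat) < (i : Nat) ∧
         PySem.Str.startswith terminals[j] "N" = true)
instance (terminals : List String) : Decidable (Pre_change_agreement terminals) := by
  unfold Pre_change_agreement; infer_instance

def pvWitness_change_agreement : List String := ["Det", "N_1_sg", "V_2_pl", "Det"]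

def Spec_change_agreement (terminals : List String) (out : List String) : Prop := out = change_agreement_alt terminals
instance (terminals : List String) (out : List String) : Decidable (Spec_change_agreement terminals out) := by unfold Spec_change_agreement; infer_instance

-- ===== CLAIM (what is proved, stated in full; the proofs are below) =====
def Claim_equal_change_agreement : Prop := ∀ (terminals : List String), Dom_change_agreement terminals → Pre_change_agreement terminals → Spec_change_agreement terminals (change_agreement terminals)

-- ===== LEMMAS AND PROOFS =====

-- A terminal cannot start with both "N" and "V".
lemma not_V_of_N {t : String} (h : PySem.Str.startswith t "N" = true) :
    PySem.Str.startswith t "V" = false := by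
  simp only [PySem.Str.startswith_eq] at h ⊢
  rw [PySem.Chars.startswith_iff] at h
  rcases h with ⟨u, hu⟩
  apply Bool.eq_false_iff.mpr
  intro hV
  rw [PySem.Chars.startswith_iff] at hV
  rcases hV with ⟨w, hw⟩
  rw [← hu] at hw
  have h1 : "V".toList = ['V'] := by decide
  have h2 : "N".toList = ['N'] := by decide
  rw [h1, h2] at hw
  simp at hw

-- pluralityBefore only looks at indices < j, so a suffix does not matter.
lemma pluralityBefore_append (pre suf : List String) :
    ∀ j, j ≤ pre.length → pluralityBefore (pre ++ suf) j = pluralityBefore pre j := by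
  intro j
  induction j with
  | zero => intro _; rfl
  | succ j ih =>
    intro hj
    have hjl : j < pre.length := by omega
    simp only [pluralityBefore, PySem.List.pyGetD_natCast]
    rw [List.getD_append _ _ _ _ hjl, ih (by omega)]

-- Unfolding pluralityBefore one step at the end of the scanned prefix.
lemma pluralityBefore_snoc (pre : List String) (t : String) :
    pluralityBefore (pre ++ [t]) (pre.length + 1) =
      if PySem.Str.startswith t "N" = true
      then PySem.List.pyGet? (splitU t) (-1)
      else pluralityBefore pre pre.length := by
  simp only [pluralityBefore, PySem.List.pyGetD_natCast]
  have h1 : (pre ++ [t]).getD pre.length "" = t := by simp [List.getD]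
  rw [h1]
  split_ifs with h
  · rfl
  · exact pluralityBefore_append pre [t] pre.length (le_refl _)

-- If some index < j holds a noun (and nouns split into 3 parts), the scan finds one.
lemma pluralityBefore_isSome (pre : List String)
    (h3 : ∀ t ∈ pre, PySem.Str.startswith t "N" = true →
            (splitU t).length = 3) :
    ∀ j, j ≤ pre.length →
      ∀ k, k < j → PySem.Str.startswith (pre.getD k "") "N" = true →
        ∃ p, pluralityBefore pre j = some p := by
  intro j
  induction j with
  | zero => intro _ k hk; omega
  | succ j ih =>
    intro hj k hk hNk
    simp only [pluralityBefore, PySem.List.pyGetD_natCast]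
    by_cases hN : PySem.Str.startswith (pre.getD j "") "N" = true
    · rw [if_pos hN]
      have hmem : pre.getD j "" ∈ pre := by
        have hjl : j < pre.length := by omega
        rw [List.getD_eq_getElem _ _ hjl]; exact List.getElem_mem _
      obtain ⟨a, b, c, habc⟩ := List.length_eq_three.mp (h3 _ hmem hN)
      rw [habc]
      exact ⟨c, by rw [PySem.List.pyGet?_neg_one]; rfl⟩
    · rw [if_neg hN]
      have hkj : k < j := by
        rcases Nat.lt_succ_iff_lt_or_eq.mp hk with h | h
        · exact h
        · subst h; exact absurd hNk hN
      exact ih (by omega) k hkj hNk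

-- Main invariant: the A-fold over a suffix, started with plural_state =
-- pluralityBefore pre pre.length, yields what B emits from index pre.length on.
lemma main_invariant (terminals : List String) (hPre : Pre_change_agreement terminals) :
    ∀ suf pre out, terminals = pre ++ suf →
      (suf.foldl stepA (out, pluralityBefore pre pre.length)).1 =
        out ++ altGo terminals pre.length suf := by
  have h3 : ∀ t ∈ terminals, PySem.Str.startswith t "N" = true → (splitU t).length = 3 := by
    intro t ht hN
    obtain ⟨i, hi, rfl⟩ := List.mem_iff_getElem.mp ht
    exact (hPre ⟨i, hi⟩).1 hN
  intro suf
  induction suf with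
  | nil => intro pre out _; simp [altGo]
  | cons t rest ih =>
    intro pre out hsplit
    have hlen : pre.length < terminals.length := by subst hsplit; simp
    have hterm : terminals[pre.length]'hlen = t := by
      subst hsplit; simp
    have hPreI := hPre ⟨pre.length, hlen⟩
    simp only [Fin.getElem_fin] at hPreI
    rw [hterm] at hPreI
    have hsplit' : terminals = (pre ++ [t]) ++ rest := by simp [hsplit]
    have hlen' : (pre ++ [t]).length = pre.length + 1 := by simp
    have ihx := fun o => ih (pre ++ [t]) o hsplit'
    simp only [hlen'] at ihx
    ·
      by_cases hN : PySem.Str.startswith t "N" = true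
      · -- noun: A yields t and updates state; B yields t
        obtain ⟨a, b, c, habc⟩ := List.length_eq_three.mp (hPreI.1 hN)
        have hstate : pluralityBefore (pre ++ [t]) (pre.length + 1) = some c := by
          rw [pluralityBefore_snoc, if_pos hN, habc, PySem.List.pyGet?_neg_one]; rfl
        have hV := not_V_of_N hN
        simp only [List.foldl_cons, stepA, hN, if_pos, habc]
        rw [hstate] at ihx
        rw [ihx (out ++ [t])]
        simp only [altGo, hV, Bool.false_eq_true, List.append_assoc,
          List.singleton_append, if_false]
      · by_cases hV : PySem.Str.startswith t "V" = true
        · -- verb: state is some p; A joins, B scans backward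
          obtain ⟨hl3, ⟨j, hj, hNj⟩⟩ := hPreI.2 hV
          obtain ⟨a, b, c, habc⟩ := List.length_eq_three.mp hl3
          have hjpre : (j : Nat) < pre.length := hj
          have hNj' : PySem.Str.startswith (pre.getD (j : Nat) "") "N" = true := by
            have : pre.getD (j : Nat) "" = terminals[(j : Nat)] := by
              rw [List.getD_eq_getElem _ _ hjpre]
              subst hsplit
              rw [List.getElem_append_left]
            rw [this]
            simpa [Fin.getElem_fin] using hNj
          obtain ⟨p, hp⟩ := pluralityBefore_isSome pre
            (fun u hu => h3 u (by subst hsplit; exact List.mem_append_left _ hu))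
            pre.length (le_refl _) (j : Nat) hjpre hNj'
          have hBscan : pluralityBefore terminals pre.length = some p := by
            rw [hsplit, pluralityBefore_append pre (t :: rest) pre.length (le_refl _)]
            exact hp
          have hstate : pluralityBefore (pre ++ [t]) (pre.length + 1) = some p := by
            rw [pluralityBefore_snoc, if_neg hN, hp]
          simp only [List.foldl_cons, stepA, hN, hV, habc, hp,
            Bool.false_eq_true, if_pos, if_false]
          rw [hstate] at ihx
          rw [ihx (out ++ [PySem.Str.join "_" [a, b, p]])]
          simp only [altGo, hV, if_pos, hBscan, habc, List.append_assoc,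
            List.singleton_append, List.getD]
          rfl
        · -- other terminal: passes through, state unchanged
          have hstate : pluralityBefore (pre ++ [t]) (pre.length + 1) =
              pluralityBefore pre pre.length := by
            rw [pluralityBefore_snoc, if_neg hN]
          simp only [List.foldl_cons, stepA, hN, hV, Bool.false_eq_true, if_false]
          rw [hstate] at ihx
          rw [ihx (out ++ [t])]
          simp only [altGo, hV, Bool.false_eq_true, List.append_assoc,
            List.singleton_append, if_false]

-- ===== VERDICT (by name: the statement is the Claim_ definition above) =====
theorem change_agreement_spec : Claim_equal_change_agreement := by
  intro terminals _ hPre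
  unfold Spec_change_agreement change_agreement change_agreement_alt
  have h := main_invariant terminals hPre terminals [] [] rfl
  simpa [pluralityBefore] using h
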